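-- pv_equiv track=rewrite | github.com/jun-yoshiyoshi/algorithm-datastructure | chapter03_2/code3_7.py | check_between
-- ===== SOURCE A (Python) =====
-- def check_between(l, T, a, b):
--     champ = 0
--     for i in range(len(T)):
--         tmp, index = 0, -1
--         for j in T[i]:
--             index += 1
--             if j == 1:
--                 tmp += l[index]
--             if tmp >= a and tmp <= b:
--                 champ = max(tmp, champ)
--     return champ
-- ===== SOURCE B (Python) =====
-- def check_between(l, T, a, b):
--     def best(row):
--         masked = [l[i] if bit == 1 else 0 for i, bit in enumerate(row)]
--         champ, s = 0, sum(masked)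
--         for v in reversed(masked):
--             if a <= s <= b and s > champ:
--                 champ = s
--             s -= v
--         return champ
--     res = 0
--     for row in T:
--         res = max(res, best(row))
--     return res
-- ===== Notes on version B (the rewrite author's own statement) =====
-- stated objective: alternative
-- what changed: Instead of A's single forward accumulate-and-update loop, B builds the masked value list up front, takes its total with sum(), and walks it BACKWARDS reconstructing each prefix sum by subtraction (s -= v), updating a per-row champion that the outer loop combines with max; prefix sums are thus derived from the total back-to-front rather than accumulated front-to-back.
import Mathlib
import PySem

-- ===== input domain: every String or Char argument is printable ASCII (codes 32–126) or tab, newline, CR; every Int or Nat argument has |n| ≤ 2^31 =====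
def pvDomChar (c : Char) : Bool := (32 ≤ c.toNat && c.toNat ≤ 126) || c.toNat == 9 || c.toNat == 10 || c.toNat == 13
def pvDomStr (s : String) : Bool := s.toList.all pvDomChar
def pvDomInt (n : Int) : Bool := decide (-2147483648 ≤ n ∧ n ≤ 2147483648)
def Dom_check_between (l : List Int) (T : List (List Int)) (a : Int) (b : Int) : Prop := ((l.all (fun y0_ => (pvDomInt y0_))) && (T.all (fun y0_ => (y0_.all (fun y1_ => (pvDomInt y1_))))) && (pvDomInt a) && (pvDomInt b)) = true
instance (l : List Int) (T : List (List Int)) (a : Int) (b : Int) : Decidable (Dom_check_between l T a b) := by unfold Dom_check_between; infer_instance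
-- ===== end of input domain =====

-- B replaces A's forward accumulate-and-update loop by a back-to-front walk: it sums the
-- masked row once and recovers each prefix sum by subtraction, combining per-row maxima
-- in an outer max (objective: alternative).

-- ===== PORT A =====
-- the body of A's inner 'for j in T[i]' loop; state = (champ, tmp, index)
def pvStepA (l : List Int) (a : Int) (b : Int) (st : Int × Int × Int) (j : Int) : Int × Int × Int :=
  let index := st.2.2 + 1
  let tmp := if j = 1 then st.2.1 + PySem.List.pyGetD l index 0 else st.2.1
  let champ := if a ≤ tmp ∧ tmp ≤ b then max tmp st.1 else st.1
  (champ, tmp, index)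

def check_between (l : List Int) (T : List (List Int)) (a : Int) (b : Int) : Int :=
  (PySem.List.pyRange 0 (PySem.List.len T)).foldl
    (fun champ i => ((PySem.List.pyGetD T i []).foldl (pvStepA l a b) (champ, 0, -1)).1) 0

-- ===== PORT B =====
-- 'for v in reversed(masked): if a <= s <= b and s > champ: champ = s; s -= v'
def pvBestStep (a : Int) (b : Int) (st : Int × Int) (v : Int) : Int × Int :=
  let champ := if a ≤ st.2 ∧ st.2 ≤ b ∧ st.1 < st.2 then st.2 else st.1
  (champ, st.2 - v)

-- the helper 'best(row)': masked list, its sum, then the backward subtraction walk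
def pvBest (l : List Int) (a : Int) (b : Int) (row : List Int) : Int :=
  let masked := (PySem.List.enumerate row).map
    (fun p => if p.2 = 1 then PySem.List.pyGetD l p.1 0 else 0)
  (masked.reverse.foldl (pvBestStep a b) (0, masked.sum)).1

def check_between_alt (l : List Int) (T : List (List Int)) (a : Int) (b : Int) : Int :=
  T.foldl (fun res row => max res (pvBest l a b row)) 0

-- ===== PRECONDITION & SPEC =====
-- Pre_ excludes exactly the inputs where Python raises IndexError: some row of T has
-- a 1 at a position ≥ len(l) (l is indexed only at 1-bit positions).
def Pre_check_between (l : List Int) (T : List (List Int)) (a : Int) (b : Int) : Prop :=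
  T.all (fun row => (PySem.List.enumerate row).all
    (fun p => !(p.2 == 1) || decide (p.1 < (l.length : Int)))) = true
instance (l : List Int) (T : List (List Int)) (a : Int) (b : Int) : Decidable (Pre_check_between l T a b) := by unfold Pre_check_between; infer_instance

def pvWitness_check_between : List Int × List (List Int) × Int × Int :=
  ([1, 2], [[1, 0], [0, 1], []], 0, 5)

def Spec_check_between (l : List Int) (T : List (List Int)) (a : Int) (b : Int) (out : Int) : Prop := out = check_between_alt l T a b
instance (l : List Int) (T : List (List Int)) (a : Int) (b : Int) (out : Int) : Decidable (Spec_check_between l T a b out) := by unfold Spec_check_between; infer_instance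

-- ===== CLAIM (what is proved, stated in full; the proofs are below) =====
def Claim_equal_check_between : Prop := ∀ (l : List Int) (T : List (List Int)) (a : Int) (b : Int), Dom_check_between l T a b → Pre_check_between l T a b → Spec_check_between l T a b (check_between l T a b)

-- ===== LEMMAS AND PROOFS =====

-- the list of masked prefix sums of `row`, indices from k, running sum starting at s
def pvSums (l : List Int) (row : List Int) (k : Int) (s : Int) : List Int :=
  match row with
  | [] => []
  | j :: rest =>
    let s' := if j = 1 then s + PySem.List.pyGetD l k 0 else s
    s' :: pvSums l rest (k + 1) s'

-- prefix sums of a plain value list, running sum starting at s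
def pvPS (m : List Int) (s : Int) : List Int :=
  match m with
  | [] => []
  | v :: r => (s + v) :: pvPS r (s + v)

theorem pvInnerA (l : List Int) (a b : Int) (row : List Int) :
    ∀ (k champ s : Int),
      (row.foldl (pvStepA l a b) (champ, s, k - 1)).1
        = ((pvSums l row k s).filter (fun s => decide (a ≤ s) && decide (s ≤ b))).foldl max champ := by
  induction row with
  | nil => intro k champ s; simp [pvSums]
  | cons j rest ih =>
    intro k champ s
    simp only [List.foldl_cons, pvSums, pvStepA]
    have hk : k - 1 + 1 = k := by ring
    rw [hk]
    set s' : Int := if j = 1 then s + PySem.List.pyGetD l k 0 else s with hs'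
    by_cases h : a ≤ s' ∧ s' ≤ b
    · have hb : (decide (a ≤ s') && decide (s' ≤ b)) = true := by
        simp [h.1, h.2]
      simp only [List.filter_cons, hb, if_pos h]
      have : max s' champ = max champ s' := max_comm _ _
      rw [this]
      have := ih (k + 1) (max champ s') s'
      rw [show k + 1 - 1 = k from by ring] at this
      exact this
    · have hb : (decide (a ≤ s') && decide (s' ≤ b)) = false := by
        rcases not_and_or.mp h with h1 | h1 <;> simp [h1]
      simp only [List.filter_cons, hb, if_neg h]
      have := ih (k + 1) champ s'
      rw [show k + 1 - 1 = k from by ring] at this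
      exact this

-- the masked prefix sums are the prefix sums of the masked value list
theorem pvSums_eq_ps (l : List Int) (row : List Int) :
    ∀ (k s : Int),
      pvSums l row k s
        = pvPS ((PySem.List.enumerate row k).map
            (fun p => if p.2 = 1 then PySem.List.pyGetD l p.1 0 else 0)) s := by
  induction row with
  | nil => intro k s; simp [pvSums, PySem.List.enumerate_nil, pvPS]
  | cons j rest ih =>
    intro k s
    rw [PySem.List.enumerate_cons]
    simp only [List.map_cons, pvSums, pvPS]
    by_cases h : j = 1
    · simp only [if_pos h]
      rw [ih]
    · simp only [if_neg h, add_zero]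
      rw [ih]

-- the backward subtraction walk visits the reversed prefix-sum list
theorem pvBack (a b : Int) :
    ∀ (m : List Int) (c s : Int),
      m.reverse.foldl (pvBestStep a b) (c, s + m.sum)
        = (((pvPS m s).reverse).foldl
            (fun c x => if a ≤ x ∧ x ≤ b ∧ c < x then x else c) c, s) := by
  intro m
  induction m with
  | nil => intro c s; simp [pvPS]
  | cons v r ih =>
    intro c s
    simp only [List.reverse_cons, List.foldl_append, List.foldl_cons, List.foldl_nil, pvPS]
    have hsum : s + (v :: r).sum = (s + v) + r.sum := by simp [List.sum_cons]; ring
    rw [hsum, ih c (s + v)]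
    simp only [pvBestStep]
    rw [add_sub_cancel_right]

theorem pvUpd_eq_max_filter (a b : Int) :
    ∀ (xs : List Int) (c : Int),
      xs.foldl (fun c x => if a ≤ x ∧ x ≤ b ∧ c < x then x else c) c
        = (xs.filter (fun s => decide (a ≤ s) && decide (s ≤ b))).foldl max c := by
  intro xs
  induction xs with
  | nil => intro c; rfl
  | cons x r ih =>
    intro c
    simp only [List.foldl_cons, List.filter_cons]
    by_cases h : a ≤ x ∧ x ≤ b
    · have hb : (decide (a ≤ x) && decide (x ≤ b)) = true := by simp [h.1, h.2]
      rw [hb]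
      simp only [if_true, List.foldl_cons]
      by_cases hc : c < x
      · rw [if_pos ⟨h.1, h.2, hc⟩, max_eq_right (le_of_lt hc)] at *
        exact ih x
      · have : (if a ≤ x ∧ x ≤ b ∧ c < x then x else c) = c := by
          rw [if_neg (fun hxx => hc hxx.2.2)]
        rw [this, max_eq_left (le_of_not_gt hc)]
        exact ih c
    · have hb : (decide (a ≤ x) && decide (x ≤ b)) = false := by
        rcases not_and_or.mp h with h1 | h1 <;> simp [h1]
      rw [hb]
      have : (if a ≤ x ∧ x ≤ b ∧ c < x then x else c) = c := by
        rw [if_neg (fun hxx => h ⟨hxx.1, hxx.2.1⟩)]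
      rw [this]
      simp only [Bool.false_eq_true, if_false]
      exact ih c

theorem pvFoldMaxMax : ∀ (xs : List Int) (c d : Int),
    xs.foldl max (max c d) = max c (xs.foldl max d) := by
  intro xs
  induction xs with
  | nil => intro c d; rfl
  | cons x r ih =>
    intro c d
    simp only [List.foldl_cons, max_assoc]
    exact ih c (max d x)

theorem pvFoldMaxReverse : ∀ (xs : List Int) (c : Int),
    xs.reverse.foldl max c = xs.foldl max c := by
  intro xs
  induction xs with
  | nil => intro c; rfl
  | cons x r ih =>
    intro c
    simp only [List.reverse_cons, List.foldl_append, List.foldl_cons, List.foldl_nil, ih]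
    rw [max_comm c x, pvFoldMaxMax r x c, max_comm]

theorem pvLeFoldMax : ∀ (xs : List Int) (c : Int), c ≤ xs.foldl max c := by
  intro xs
  induction xs with
  | nil => intro c; exact le_refl c
  | cons x r ih =>
    intro c
    exact le_trans (le_max_left c x) (ih (max c x))

-- B's per-row best equals the champ fold over the filtered masked prefix sums, seeded 0
theorem pvBest_eq (l : List Int) (a b : Int) (row : List Int) :
    pvBest l a b row
      = ((pvSums l row 0 0).filter (fun s => decide (a ≤ s) && decide (s ≤ b))).foldl max 0 := by
  unfold pvBest
  set m := (PySem.List.enumerate row).map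
    (fun p => if p.2 = 1 then PySem.List.pyGetD l p.1 0 else 0) with hm
  show (m.reverse.foldl (pvBestStep a b) (0, m.sum)).1 = _
  have h0 : ((0 : Int), m.sum) = ((0 : Int), (0 : Int) + m.sum) := by simp
  rw [h0, pvBack a b m 0 0]
  simp only
  rw [pvUpd_eq_max_filter, List.filter_reverse, pvFoldMaxReverse]
  rw [pvSums_eq_ps]

theorem pvOuterB (l : List Int) (a b : Int) :
    ∀ (T : List (List Int)) (c : Int), 0 ≤ c →
      T.foldl (fun res row => max res (pvBest l a b row)) c
        = T.foldl (fun champ row =>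
            ((pvSums l row 0 0).filter (fun s => decide (a ≤ s) && decide (s ≤ b))).foldl max champ) c := by
  intro T
  induction T with
  | nil => intro c _; rfl
  | cons row rest ih =>
    intro c hc
    simp only [List.foldl_cons]
    rw [pvBest_eq]
    set f := (pvSums l row 0 0).filter (fun s => decide (a ≤ s) && decide (s ≤ b)) with hf
    have : max c (f.foldl max 0) = f.foldl max c := by
      rw [← pvFoldMaxMax f c 0, max_eq_left hc]
    rw [this]
    exact ih _ (le_trans hc (pvLeFoldMax f c))

theorem pvFold_congr (l : List Int) (a b : Int) :
    ∀ (T : List (List Int)) (c : Int),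
      T.foldl (fun champ row => ((row.foldl (pvStepA l a b) (champ, 0, -1)).1)) c
        = T.foldl (fun champ row =>
            ((pvSums l row 0 0).filter (fun s => decide (a ≤ s) && decide (s ≤ b))).foldl max champ) c := by
  intro T
  induction T with
  | nil => intro c; rfl
  | cons row rest ih =>
    intro c
    simp only [List.foldl_cons]
    rw [← ih]
    congr 1
    have := pvInnerA l a b row 0 c 0
    simpa using this

-- ===== VERDICT (by name: the statement is the Claim_ definition above) =====
theorem check_between_spec : Claim_equal_check_between := by
  intro l T a b _ _
  unfold Spec_check_between check_between_alt
  rw [pvOuterB l a b T 0 (le_refl 0)]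
  unfold check_between
  rw [PySem.List.foldl_pyRange_zero_pyGetD T ([] : List Int)
        (fun champ row => ((row.foldl (pvStepA l a b) (champ, 0, -1)).1)) 0]
  rw [pvFold_congr]
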